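-- pv_equiv track=rewrite | github.com/kevinau-git/public_transfer | SimilarityDiff.py | _sequential_coverage
-- ===== SOURCE A (Python) =====
-- def _sequential_coverage(a, b):
--     """Calculate sequential coverage using longest common subsequence."""
--     a_lower = a.lower()
--     b_lower = b.lower()
--
--     # Dynamic programming for longest common subsequence
--     dp = [[0] * (len(b_lower) + 1) for _ in range(len(a_lower) + 1)]
--
--     for i in range(1, len(a_lower) + 1):
--         for j in range(1, len(b_lower) + 1):
--             if a_lower[i-1] == b_lower[j-1]:
--                 dp[i][j] = dp[i-1][j-1] + 1
--             else:
--                 dp[i][j] = max(dp[i-1][j], dp[i][j-1])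
--
--     return int((dp[len(a_lower)][len(b_lower)] / len(a)) * 100)
-- ===== SOURCE B (Python) =====
-- def _sequential_coverage(a, b):
--     """LCS coverage via top-down memoized recursion instead of a bottom-up 2D table."""
--     a_lower = a.lower()
--     b_lower = b.lower()
--     memo = {}
--
--     def lcs(i, j):
--         if i == 0 or j == 0:
--             return 0
--         hit = memo.get((i, j))
--         if hit is not None:
--             return hit
--         if a_lower[i - 1] == b_lower[j - 1]:
--             r = lcs(i - 1, j - 1) + 1
--         else:
--             r = max(lcs(i - 1, j), lcs(i, j - 1))
--         memo[(i, j)] = r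
--         return r
--
--     return int((lcs(len(a_lower), len(b_lower)) / len(a)) * 100)
-- ===== Notes on version B (the rewrite author's own statement) =====
-- stated objective: alternative
-- what changed: Replaces A's bottom-up 2D DP table filled by nested index loops with top-down recursion lcs(i,j) memoized in a dict keyed by (i,j), computing only the subproblems actually reached from (len(a),len(b)).
import Mathlib
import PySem

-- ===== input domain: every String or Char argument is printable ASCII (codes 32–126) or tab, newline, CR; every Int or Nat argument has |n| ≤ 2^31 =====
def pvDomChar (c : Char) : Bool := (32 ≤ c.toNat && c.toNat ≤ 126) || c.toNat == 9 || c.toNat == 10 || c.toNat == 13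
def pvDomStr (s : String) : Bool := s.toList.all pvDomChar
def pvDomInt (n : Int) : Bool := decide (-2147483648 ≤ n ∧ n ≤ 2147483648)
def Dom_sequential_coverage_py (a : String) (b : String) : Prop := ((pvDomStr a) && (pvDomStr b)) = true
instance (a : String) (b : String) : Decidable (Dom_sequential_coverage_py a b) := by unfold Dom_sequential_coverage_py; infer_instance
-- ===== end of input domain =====

-- B replaces A's bottom-up 2D DP table (nested index loops) by top-down recursion lcs(i, j)
-- memoized in a dict keyed by (i, j); return values are proved equal whenever len(a) > 0.

-- ===== shared float helper (exact hand port of CPython's binary64 `int((L/n)*100)` on 0 ≤ L ≤ n) =====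
-- `pvScaled p q t` represents the rational (p/q)·2^t as a pair of naturals.
def pvScaled (p q : Nat) (t : Int) : Nat × Nat :=
  if 0 ≤ t then (p <<< t.toNat, q) else (p, q <<< (-t).toNat)

-- round the positive rational p/q to the nearest IEEE binary64 value m·2^e (round half to even);
-- exact for the normal, non-overflowing range used here.
def pvRound53 (p q : Nat) : Nat × Int :=
  if p = 0 then (0, 0) else
  let t0 : Int := 52 - ((Nat.log2 p : Int) - (Nat.log2 q : Int))
  let s1 := pvScaled p q t0
  let m1 := s1.1 / s1.2
  let t1 : Int := if m1 < 2 ^ 52 then t0 + 1 else if 2 ^ 53 ≤ m1 then t0 - 1 else t0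
  let s2 := pvScaled p q t1
  let m2 := s2.1 / s2.2
  let r := s2.1 - m2 * s2.2
  let m3 := if s2.2 < 2 * r ∨ (2 * r = s2.2 ∧ m2 % 2 = 1) then m2 + 1 else m2
  if m3 = 2 ^ 53 then (2 ^ 52, 1 - t1) else (m3, -t1)

-- `int((L/n)*100)` in binary64: round L/n, multiply by 100, round again, truncate.
def pvPct (L : Int) (n : Nat) : Int :=
  let p := L.toNat
  if p = 0 then 0 else
  let d1 := pvRound53 p n
  let pq : Nat × Nat :=
    if 0 ≤ d1.2 then ((d1.1 * 100) <<< d1.2.toNat, 1) else (d1.1 * 100, 1 <<< (-d1.2).toNat)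
  let d2 := pvRound53 pq.1 pq.2
  ((if 0 ≤ d2.2 then d2.1 <<< d2.2.toNat else d2.1 >>> (-d2.2).toNat : Nat) : Int)

-- ===== PORT A =====
-- one execution of A's inner-loop body (dp[i][j] = …) at integer indices i, j
def stepCellA (al bl : List Char) (dp : List (List Int)) (i j : Int) : List (List Int) :=
  let v : Int :=
    if PySem.List.pyGetD al (i - 1) ' ' == PySem.List.pyGetD bl (j - 1) ' ' then
      PySem.List.pyGetD (PySem.List.pyGetD dp (i - 1) []) (j - 1) 0 + 1
    else
      max (PySem.List.pyGetD (PySem.List.pyGetD dp (i - 1) []) j 0)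
          (PySem.List.pyGetD (PySem.List.pyGetD dp i []) (j - 1) 0)
  PySem.List.pySetD dp i (PySem.List.pySetD (PySem.List.pyGetD dp i []) j v)

def sequential_coverage_py (a : String) (b : String) : Int :=
  let al := PySem.Chars.lower a.toList
  let bl := PySem.Chars.lower b.toList
  let dp0 : List (List Int) :=
    (List.range (al.length + 1)).map (fun _ => List.replicate (bl.length + 1) (0 : Int))
  let dp := (PySem.List.pyRange 1 ((al.length : Int) + 1) 1).foldl (fun dp i =>
      (PySem.List.pyRange 1 ((bl.length : Int) + 1) 1).foldl
        (fun dp j => stepCellA al bl dp i j) dp) dp0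
  let lcs := PySem.List.pyGetD (PySem.List.pyGetD dp (al.length : Int) []) (bl.length : Int) 0
  pvPct lcs a.toList.length

-- ===== PORT B =====
-- B's inner `def lcs(i, j)` with its closed-over `memo` dict threaded explicitly (Python mutates
-- the one dict in place; the returned dict carries that state).  Indices are in range whenever the
-- character accesses are reached (1 ≤ i ≤ len(al), 1 ≤ j ≤ len(bl)), so `getD` is exact there.
def lcsMemoB (al bl : List Char) :
    Nat → Nat → PySem.Dict (Int × Int) Int → Int × PySem.Dict (Int × Int) Int
  | 0, _, memo => (0, memo)
  | _ + 1, 0, memo => (0, memo)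
  | i + 1, j + 1, memo =>
    match PySem.Dict.get? memo (((i : Int) + 1), ((j : Int) + 1)) with
    | some hit => (hit, memo)
    | none =>
      let rm :=
        if al.getD i ' ' == bl.getD j ' ' then
          let p := lcsMemoB al bl i j memo
          (p.1 + 1, p.2)
        else
          let p := lcsMemoB al bl i (j + 1) memo
          let q := lcsMemoB al bl (i + 1) j p.2
          (max p.1 q.1, q.2)
      (rm.1, PySem.Dict.insert rm.2 (((i : Int) + 1), ((j : Int) + 1)) rm.1)
  termination_by i j _ => (i, j)

def sequential_coverage_py_alt (a : String) (b : String) : Int :=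
  let al := PySem.Chars.lower a.toList
  let bl := PySem.Chars.lower b.toList
  pvPct (lcsMemoB al bl al.length bl.length PySem.Dict.empty).1 a.toList.length

-- ===== PRECONDITION & SPEC =====
-- Pre_ excludes exactly a = "", where A (and B) raise ZeroDivisionError on `/ len(a)`.
def Pre_sequential_coverage_py (a : String) (b : String) : Prop := a.toList ≠ []
instance (a : String) (b : String) : Decidable (Pre_sequential_coverage_py a b) := by
  unfold Pre_sequential_coverage_py; infer_instance

def pvWitness_sequential_coverage_py : String × String := ("Hack", "habck")

def Spec_sequential_coverage_py (a : String) (b : String) (out : Int) : Prop := out = sequential_coverage_py_alt a b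
instance (a : String) (b : String) (out : Int) : Decidable (Spec_sequential_coverage_py a b out) := by unfold Spec_sequential_coverage_py; infer_instance

-- ===== CLAIM (what is proved, stated in full; the proofs are below) =====
def Claim_equal_sequential_coverage_py : Prop := ∀ (a : String) (b : String), Dom_sequential_coverage_py a b → Pre_sequential_coverage_py a b → Spec_sequential_coverage_py a b (sequential_coverage_py a b)

-- ===== LEMMAS AND PROOFS =====

-- the LCS-of-prefixes function both programs compute: lcsF al bl i j = LCS length of al[:i], bl[:j]
def lcsF (al bl : List Char) : Nat → Nat → Int
  | 0, _ => 0
  | _ + 1, 0 => 0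
  | i + 1, j + 1 =>
    if al.getD i ' ' = bl.getD j ' ' then lcsF al bl i j + 1
    else max (lcsF al bl i (j + 1)) (lcsF al bl (i + 1) j)
  termination_by i j => (i, j)

theorem lcsF_zero_right (al bl : List Char) (i : Nat) : lcsF al bl i 0 = 0 := by
  cases i <;> simp [lcsF]

-- A's table after fully processing rows 1..i and, within row i, columns 0..j (other cells still 0)
def entA (al bl : List Char) (i j r c : Nat) : Int :=
  if r < i ∨ (r = i ∧ c ≤ j) then lcsF al bl r c else 0

def tblA (al bl : List Char) (i j : Nat) : List (List Int) :=
  (List.range (al.length + 1)).map (fun r => (List.range (bl.length + 1)).map (entA al bl i j r))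

theorem tblA_getD (al bl : List Char) (i j r c : Nat) (hr : r < al.length + 1)
    (hc : c < bl.length + 1) :
    ((tblA al bl i j).getD r []).getD c 0 = entA al bl i j r c := by
  unfold tblA
  rw [PySem.List.getD_map_range _ _ _ _ hr, PySem.List.getD_map_range _ _ _ _ hc]

theorem stepA (al bl : List Char) (i j : Nat) (h1 : 1 ≤ i) (hi : i ≤ al.length)
    (hj : j < bl.length) :
    stepCellA al bl (tblA al bl i j) (i : Int) ((j : Int) + 1) = tblA al bl i (j + 1) := by
  obtain ⟨i', rfl⟩ : ∃ i', i = i' + 1 := ⟨i - 1, by omega⟩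
  unfold stepCellA
  have e1 : ((i' + 1 : Nat) : Int) - 1 = ((i' : Nat) : Int) := by push_cast; ring
  have e3 : ((j : Nat) : Int) + 1 = ((j + 1 : Nat) : Int) := by push_cast; ring
  have e2 : ((j + 1 : Nat) : Int) - 1 = ((j : Nat) : Int) := by push_cast; ring
  simp only [e1, e3, e2, PySem.List.pyGetD_natCast, PySem.List.pySetD_natCast]
  rw [tblA_getD al bl _ _ i' j (by omega) (by omega),
      tblA_getD al bl _ _ i' (j + 1) (by omega) (by omega)]
  -- remaining dp[i] accesses
  have hrow : (tblA al bl (i' + 1) j).getD (i' + 1) []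
      = (List.range (bl.length + 1)).map (entA al bl (i' + 1) j (i' + 1)) := by
    unfold tblA
    rw [PySem.List.getD_map_range _ _ _ _ (by omega)]
  rw [hrow, PySem.List.getD_map_range _ _ _ _ (by omega : j < bl.length + 1)]
  have hent1 : entA al bl (i' + 1) j i' j = lcsF al bl i' j := by
    unfold entA; rw [if_pos (Or.inl (by omega))]
  have hent2 : entA al bl (i' + 1) j i' (j + 1) = lcsF al bl i' (j + 1) := by
    unfold entA; rw [if_pos (Or.inl (by omega))]
  have hent3 : entA al bl (i' + 1) j (i' + 1) j = lcsF al bl (i' + 1) j := by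
    unfold entA; rw [if_pos (Or.inr ⟨rfl, by omega⟩)]
  rw [hent1, hent2, hent3]
  -- the written value is lcsF (i'+1) (j+1)
  have hv : (if (al.getD i' ' ' == bl.getD j ' ') = true then lcsF al bl i' j + 1
      else max (lcsF al bl i' (j + 1)) (lcsF al bl (i' + 1) j))
      = lcsF al bl (i' + 1) (j + 1) := by
    simp only [lcsF]
    by_cases hc : al.getD i' ' ' = bl.getD j ' '
    · rw [if_pos (beq_iff_eq.mpr hc), if_pos hc]
    · rw [if_neg (fun h => hc (beq_iff_eq.mp h)), if_neg hc]
  rw [hv]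
  -- now the set-set equals the next table
  apply List.ext_getElem (by simp [tblA])
  intro r hr1 hr2
  simp only [tblA, List.getElem_map, List.getElem_range, List.length_map,
    List.length_range] at hr2 ⊢
  have hr2' : r < al.length + 1 := by simpa using hr2
  rw [List.getElem_set]
  split_ifs with hre
  · subst hre
    apply List.ext_getElem (by simp)
    intro c hc1 hc2
    simp only [List.getElem_map, List.getElem_range, List.length_map, List.length_range] at hc2 ⊢
    rw [List.getElem_set]
    simp only [List.getElem_map, List.getElem_range]
    split_ifs with hce
    · subst hce
      unfold entA
      rw [if_pos (Or.inr ⟨rfl, by omega⟩)]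
    · unfold entA
      split_ifs with ha hb hb'
      · rfl
      · exact absurd (by rcases ha with h | ⟨h, hcj⟩
                         · exact Or.inl h
                         · exact Or.inr ⟨h, by omega⟩) hb
      · rcases hb' with h | ⟨h, hcj⟩
        · exact absurd (Or.inl h) ha
        · exact absurd (Or.inr ⟨h, by omega⟩) ha
      · rfl
  · simp only [List.getElem_map, List.getElem_range]
    apply List.map_congr_left
    intro c hc
    unfold entA
    split_ifs with ha hb hb'
    · rfl
    · exact absurd (by rcases ha with h | ⟨h, hcj⟩
                       · exact Or.inl h
                       · exact absurd h.symm hre) hb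
    · rcases hb' with h | ⟨h, hcj⟩
      · exact absurd (Or.inl h) ha
      · exact absurd h.symm hre
    · rfl

theorem innerA (al bl : List Char) (i : Nat) (h1 : 1 ≤ i) (hi : i ≤ al.length)
    (k j0 : Nat) (hk : j0 + k = bl.length) :
    (PySem.List.pyRange ((j0 : Int) + 1) ((bl.length : Int) + 1) 1).foldl
      (fun dp j => stepCellA al bl dp (i : Int) j) (tblA al bl i j0)
      = tblA al bl i bl.length := by
  induction k generalizing j0 with
  | zero =>
    rw [PySem.List.pyRange_one_eq_nil (by omega)]
    have : j0 = bl.length := by omega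
    subst this; rfl
  | succ k ih =>
    rw [PySem.List.pyRange_one_cons (by omega)]
    simp only [List.foldl_cons]
    rw [stepA al bl i j0 h1 hi (by omega)]
    have e : (j0 : Int) + 1 + 1 = ((j0 + 1 : Nat) : Int) + 1 := by push_cast; ring
    rw [e]
    exact ih (j0 + 1) (by omega)

theorem innerA0 (al bl : List Char) (i : Nat) (h1 : 1 ≤ i) (hi : i ≤ al.length) :
    (PySem.List.pyRange 1 ((bl.length : Int) + 1) 1).foldl
      (fun dp j => stepCellA al bl dp (i : Int) j) (tblA al bl i 0)
      = tblA al bl i bl.length := by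
  have h := innerA al bl i h1 hi bl.length 0 (by omega)
  simpa using h

theorem tblA_roll (al bl : List Char) (i : Nat) :
    tblA al bl i bl.length = tblA al bl (i + 1) 0 := by
  unfold tblA
  apply List.map_congr_left
  intro r hr
  apply List.map_congr_left
  intro c hc
  simp only [List.mem_range] at hr hc
  unfold entA
  have hcn : c ≤ bl.length := by omega
  split_ifs with h1 h2 h3
  · rfl
  · exact absurd (Or.inl (by rcases h1 with h | ⟨h, _⟩ <;> omega)) h2
  · push Not at h1
    rcases h3 with h | ⟨h, hc0⟩
    · omega
    · obtain rfl : c = 0 := by omega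
      subst h; exact (lcsF_zero_right al bl _).symm
  · rfl

theorem tblA_init (al bl : List Char) :
    (List.range (al.length + 1)).map (fun _ => List.replicate (bl.length + 1) (0 : Int))
      = tblA al bl 0 bl.length := by
  unfold tblA
  apply List.map_congr_left
  intro r hr
  apply List.ext_getElem (by simp)
  intro c h1 h2
  simp only [List.getElem_replicate, List.getElem_map, List.getElem_range]
  unfold entA
  split_ifs with h
  · rcases h with h | ⟨rfl, _⟩
    · omega
    · simp [lcsF]
  · rfl

theorem outerA (al bl : List Char) (k i0 : Nat) (hk : i0 + k = al.length) :
    (PySem.List.pyRange ((i0 : Int) + 1) ((al.length : Int) + 1) 1).foldl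
      (fun dp i => (PySem.List.pyRange 1 ((bl.length : Int) + 1) 1).foldl
        (fun dp j => stepCellA al bl dp i j) dp)
      (tblA al bl i0 bl.length) = tblA al bl al.length bl.length := by
  induction k generalizing i0 with
  | zero =>
    have : i0 = al.length := by omega
    subst this
    rw [show PySem.List.pyRange ((al.length : Int) + 1) ((al.length : Int) + 1) 1 = []
      from PySem.List.pyRange_one_eq_nil (by omega)]
    rfl
  | succ k ih =>
    rw [PySem.List.pyRange_one_cons (a := (i0 : Int) + 1) (b := (al.length : Int) + 1)
      (by omega)]
    simp only [List.foldl_cons]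
    rw [tblA_roll]
    have e1 : ((i0 : Int) + 1) = (((i0 + 1 : Nat)) : Int) := by push_cast; ring
    rw [e1, innerA0 al bl (i0 + 1) (by omega) (by omega)]
    exact ih (i0 + 1) (by omega)

theorem outerA0 (al bl : List Char) :
    (PySem.List.pyRange 1 ((al.length : Int) + 1) 1).foldl
      (fun dp i => (PySem.List.pyRange 1 ((bl.length : Int) + 1) 1).foldl
        (fun dp j => stepCellA al bl dp i j) dp)
      (tblA al bl 0 bl.length) = tblA al bl al.length bl.length := by
  have h := outerA al bl al.length 0 (by omega)
  simpa using h

theorem portA_eq (a b : String) :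
    sequential_coverage_py a b
      = pvPct (lcsF (PySem.Chars.lower a.toList) (PySem.Chars.lower b.toList)
          (PySem.Chars.lower a.toList).length (PySem.Chars.lower b.toList).length)
          a.toList.length := by
  simp only [sequential_coverage_py]
  rw [tblA_init, outerA0]
  rw [PySem.List.pyGetD_natCast, PySem.List.pyGetD_natCast,
    tblA_getD _ _ _ _ _ _ (by omega) (by omega)]
  have he : ∀ al bl : List Char,
      entA al bl al.length bl.length al.length bl.length
        = lcsF al bl al.length bl.length := by
    intro al bl; unfold entA; rw [if_pos (Or.inr ⟨rfl, le_refl _⟩)]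
  rw [he]

-- B-side: the memo dict only ever holds correct LCS values
def MemoOK (al bl : List Char) (memo : PySem.Dict (Int × Int) Int) : Prop :=
  ∀ (i j : Nat) (v : Int), memo.get? ((i : Int), (j : Int)) = some v → v = lcsF al bl i j

theorem memoOK_empty (al bl : List Char) : MemoOK al bl PySem.Dict.empty := by
  intro i j v h
  rw [PySem.Dict.get?_empty] at h
  exact absurd h (by simp)

theorem memoOK_insert (al bl : List Char) (memo : PySem.Dict (Int × Int) Int)
    (h : MemoOK al bl memo) (i j : Nat) (v : Int) (hv : v = lcsF al bl i j) :
    MemoOK al bl (memo.insert ((i : Int), (j : Int)) v) := by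
  intro i' j' v' h'
  rw [PySem.Dict.get?_insert] at h'
  split_ifs at h' with hk
  · obtain ⟨hi, hj⟩ := Prod.mk.injEq .. ▸ hk
    obtain rfl : i' = i := by exact_mod_cast hi
    obtain rfl : j' = j := by exact_mod_cast hj
    cases h'
    exact hv
  · exact h i' j' v' h'

theorem lcsMemoB_correct (al bl : List Char) :
    ∀ (n i j : Nat) (memo : PySem.Dict (Int × Int) Int), i + j ≤ n → MemoOK al bl memo →
      (lcsMemoB al bl i j memo).1 = lcsF al bl i j ∧ MemoOK al bl (lcsMemoB al bl i j memo).2 := by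
  intro n
  induction n with
  | zero =>
    intro i j memo hn hm
    obtain rfl : i = 0 := by omega
    obtain rfl : j = 0 := by omega
    exact ⟨by simp [lcsMemoB, lcsF], by simpa [lcsMemoB] using hm⟩
  | succ n ih =>
    intro i j memo hn hm
    match i, j with
    | 0, j => exact ⟨by simp [lcsMemoB, lcsF], by simpa [lcsMemoB] using hm⟩
    | i + 1, 0 => exact ⟨by simp [lcsMemoB, lcsF_zero_right], by simpa [lcsMemoB] using hm⟩
    | i + 1, j + 1 =>
      rw [lcsMemoB]
      cases hget : PySem.Dict.get? memo (((i : Int) + 1), ((j : Int) + 1)) with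
      | some hit =>
        refine ⟨?_, hm⟩
        have := hm (i + 1) (j + 1) hit (by push_cast; exact_mod_cast hget)
        simpa using this
      | none =>
        simp only []
        by_cases hc : al.getD i ' ' = bl.getD j ' '
        · rw [if_pos (beq_iff_eq.mpr hc)]
          obtain ⟨hp1, hp2⟩ := ih i j memo (by omega) hm
          constructor
          · simp only [hp1, lcsF, if_pos hc]
          · have : ((i : Int) + 1, (j : Int) + 1)
                = (((i + 1 : Nat) : Int), ((j + 1 : Nat) : Int)) := by push_cast; rfl
            rw [this]
            exact memoOK_insert al bl _ hp2 (i + 1) (j + 1) _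
              (by simp only [hp1, lcsF, if_pos hc])
        · rw [if_neg (fun h => hc (beq_iff_eq.mp h))]
          obtain ⟨hp1, hp2⟩ := ih i (j + 1) memo (by omega) hm
          obtain ⟨hq1, hq2⟩ := ih (i + 1) j (lcsMemoB al bl i (j + 1) memo).2 (by omega) hp2
          constructor
          · simp only [hp1, hq1, lcsF, if_neg hc]
          · have : ((i : Int) + 1, (j : Int) + 1)
                = (((i + 1 : Nat) : Int), ((j + 1 : Nat) : Int)) := by push_cast; rfl
            rw [this]
            exact memoOK_insert al bl _ hq2 (i + 1) (j + 1) _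
              (by simp only [hp1, hq1, lcsF, if_neg hc])

theorem portB_eq (a b : String) :
    sequential_coverage_py_alt a b
      = pvPct (lcsF (PySem.Chars.lower a.toList) (PySem.Chars.lower b.toList)
          (PySem.Chars.lower a.toList).length (PySem.Chars.lower b.toList).length)
          a.toList.length := by
  simp only [sequential_coverage_py_alt]
  rw [(lcsMemoB_correct (PySem.Chars.lower a.toList) (PySem.Chars.lower b.toList)
    ((PySem.Chars.lower a.toList).length + (PySem.Chars.lower b.toList).length)
    (PySem.Chars.lower a.toList).length (PySem.Chars.lower b.toList).length
    PySem.Dict.empty (le_refl _) (memoOK_empty _ _)).1]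

-- ===== VERDICT (by name: the statement is the Claim_ definition above) =====
theorem sequential_coverage_py_spec : Claim_equal_sequential_coverage_py := by
  intro a b _ _
  unfold Spec_sequential_coverage_py
  rw [portA_eq, portB_eq]
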